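-- pv_equiv track=rewrite | github.com/jmhee28/Coding-Test | 프로그래머스/3/340210. ［PCCP 기출문제］ 4번 ／ 수식 복원하기/［PCCP 기출문제］ 4번 ／ 수식 복원하기.py | to_10base
-- ===== SOURCE A (Python) =====
-- def to_10base(n, base):
--     n = int(n)
--     t = 0
--     ret = 0
--     while n:
--         cur = n % 10
--         ret += (base ** t) * cur
--         t += 1
--         n //= 10
--     return ret
-- ===== SOURCE B (Python) =====
-- def to_10base(n, base):
--     ret = 0
--     for ch in str(int(n)):
--         ret = ret * base + (ord(ch) - 48)
--     return ret
-- ===== Notes on version B (the rewrite author's own statement) =====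
-- stated objective: idiomatic
-- what changed: Replaces A's low-to-high digit extraction (n%10, n//=10) with explicit base**t powers by Horner's method over str(n): a single accumulator ret = ret*base + digit threaded over the decimal digits high-to-low, with no power computation.
import Mathlib
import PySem

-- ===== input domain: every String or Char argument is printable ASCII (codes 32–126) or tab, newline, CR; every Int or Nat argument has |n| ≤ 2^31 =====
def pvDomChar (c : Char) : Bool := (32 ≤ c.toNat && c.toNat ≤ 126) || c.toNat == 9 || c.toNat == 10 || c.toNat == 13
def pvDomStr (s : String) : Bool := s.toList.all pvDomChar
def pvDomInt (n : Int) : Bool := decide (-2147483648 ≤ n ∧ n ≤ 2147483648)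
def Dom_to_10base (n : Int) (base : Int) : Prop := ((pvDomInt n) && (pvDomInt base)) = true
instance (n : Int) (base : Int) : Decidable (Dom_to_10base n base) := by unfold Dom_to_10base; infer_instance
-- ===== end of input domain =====

-- B replaces A's low-to-high digit extraction with explicit base**t powers by Horner's
-- method over str(n) (single accumulator, high-to-low digits); equivalence proved for 0 ≤ n
-- (A's while-loop never terminates for negative n, so Pre_ excludes them).


-- ===== PORT A =====
-- 'while n:' with cur = n % 10; ret += base**t * cur; t += 1; n //= 10.
-- Fuel n.natAbs + 1 exceeds the iteration count for every n ≥ 0 (the loop diverges for n < 0,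
-- which Pre_to_10base excludes); each step is Python-exact via PySem.Int.mod / floordiv.
def to10Loop (base : Int) : Nat → Int → Nat → Int → Int
  | 0, _, _, ret => ret
  | fuel + 1, n, t, ret =>
    if n ≠ 0 then
      to10Loop base fuel (PySem.Int.floordiv n 10) (t + 1) (ret + base ^ t * PySem.Int.mod n 10)
    else ret

def to_10base (n : Int) (base : Int) : Int :=
  to10Loop base (n.natAbs + 1) n 0 0

-- ===== PORT B =====
-- Horner over the characters of str(int(n)): ret = ret * base + (ord(ch) - 48).
def to_10base_alt (n : Int) (base : Int) : Int :=
  (PySem.Int.toChars n).foldl (fun ret c => ret * base + ((c.toNat : Int) - 48)) 0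

-- ===== PRECONDITION & SPEC =====
-- Pre_ excludes only n < 0: there Python A's while-loop never terminates (n //= 10 stalls at -1),
-- so A returns on exactly the inputs Pre_ admits.
def Pre_to_10base (n : Int) (base : Int) : Prop := 0 ≤ n
instance (n : Int) (base : Int) : Decidable (Pre_to_10base n base) := by unfold Pre_to_10base; infer_instance
def pvWitness_to_10base : Int × Int := (2024, 7)

def Spec_to_10base (n : Int) (base : Int) (out : Int) : Prop := out = to_10base_alt n base
instance (n : Int) (base : Int) (out : Int) : Decidable (Spec_to_10base n base out) := by unfold Spec_to_10base; infer_instance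

-- ===== CLAIM (what is proved, stated in full; the proofs are below) =====
def Claim_equal_to_10base : Prop := ∀ (n : Int) (base : Int), Dom_to_10base n base → Pre_to_10base n base → Spec_to_10base n base (to_10base n base)

-- ===== LEMMAS AND PROOFS =====

-- The common mathematical value: read m's decimal digits as base-`base` digits.
def pvVal (base : Int) (m : Nat) : Int :=
  if h : m = 0 then 0
  else ((m % 10 : Nat) : Int) + base * pvVal base (m / 10)
decreasing_by exact Nat.div_lt_self (Nat.pos_of_ne_zero h) (by omega)

lemma to10Loop_eq (base : Int) :
    ∀ (fuel : Nat) (n : Int) (t : Nat) (ret : Int), 0 ≤ n → n.toNat < fuel →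
      to10Loop base fuel n t ret = ret + base ^ t * pvVal base n.toNat := by
  intro fuel
  induction fuel with
  | zero => intro n t ret hn hf; omega
  | succ f ih =>
    intro n t ret hn hf
    by_cases h0 : n = 0
    · subst h0
      simp [to10Loop, pvVal]
    · have hpos : 0 < n := lt_of_le_of_ne hn (Ne.symm h0)
      have hdiv : PySem.Int.floordiv n 10 = ((n.toNat / 10 : Nat) : Int) := by
        have := PySem.Int.floordiv_natCast n.toNat 10
        rwa [Int.toNat_of_nonneg hn] at this
      have hmod : PySem.Int.mod n 10 = ((n.toNat % 10 : Nat) : Int) := by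
        have := PySem.Int.mod_natCast n.toNat 10
        rwa [Int.toNat_of_nonneg hn] at this
      have hlt : (((n.toNat / 10 : Nat) : Int)).toNat < f := by
        simp only [Int.toNat_natCast]
        have h1 : 0 < n.toNat := by omega
        have := Nat.div_lt_self h1 (by omega : 1 < 10)
        omega
      rw [show to10Loop base (f + 1) n t ret =
            to10Loop base f (PySem.Int.floordiv n 10) (t + 1)
              (ret + base ^ t * PySem.Int.mod n 10) by simp [to10Loop, h0]]
      rw [hdiv, hmod, ih _ _ _ (by positivity) hlt]
      rw [show pvVal base n.toNat =
            ((n.toNat % 10 : Nat) : Int) + base * pvVal base (n.toNat / 10) by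
        rw [pvVal]; simp [show ¬ n.toNat = 0 by omega]]
      simp only [Int.toNat_natCast]
      ring

lemma digitChar_val (d : Nat) (hd : d < 10) : ((Nat.digitChar d).toNat : Int) - 48 = (d : Int) := by
  interval_cases d <;> decide

-- Accumulator shift for core's toDigitsCore (specific to relating B's fold to the digit list).
lemma tdc_shift : ∀ (f n : Nat) (acc : List Char),
    Nat.toDigitsCore 10 f n acc = Nat.toDigitsCore 10 f n [] ++ acc := by
  intro f
  induction f with
  | zero => intro n acc; simp [Nat.toDigitsCore]
  | succ f ih =>
    intro n acc
    simp only [Nat.toDigitsCore]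
    by_cases h : n / 10 = 0
    · simp [h]
    · simp only [h, ite_false]
      rw [ih (n / 10) (Nat.digitChar (n % 10) :: acc), ih (n / 10) [Nat.digitChar (n % 10)]]
      simp

lemma tdc_fuel : ∀ (f : Nat), ∀ (g n : Nat), n < f → n < g →
    Nat.toDigitsCore 10 f n [] = Nat.toDigitsCore 10 g n [] := by
  intro f
  induction f with
  | zero => intro g n hf hg; omega
  | succ f ih =>
    intro g n hf hg
    match g, hg with
    | g + 1, hg =>
      simp only [Nat.toDigitsCore]
      by_cases h : n / 10 = 0
      · simp [h]
      · simp only [h, ite_false]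
        rw [tdc_shift f, tdc_shift g]
        have hn : 0 < n := by
          by_contra hc
          simp [show n = 0 by omega] at h
        have hlt : n / 10 < n := Nat.div_lt_self hn (by omega)
        rw [ih g (n / 10) (by omega) (by omega)]

lemma toDigits_step (m : Nat) (hm : 10 ≤ m) :
    Nat.toDigits 10 m = Nat.toDigits 10 (m / 10) ++ [Nat.digitChar (m % 10)] := by
  have h : ¬ m / 10 = 0 := by
    have := Nat.div_le_div_right (c := 10) hm
    simp at this; omega
  have hlt : m / 10 < m := Nat.div_lt_self (by omega) (by omega)
  unfold Nat.toDigits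
  rw [show Nat.toDigitsCore 10 (m + 1) m [] =
        Nat.toDigitsCore 10 m (m / 10) [Nat.digitChar (m % 10)] by
    simp [Nat.toDigitsCore, h]]
  rw [tdc_shift, tdc_fuel m (m / 10 + 1) (m / 10) (by omega) (by omega)]

lemma toDigits_small (m : Nat) (hm : m < 10) :
    Nat.toDigits 10 m = [Nat.digitChar m] := by
  have h : m / 10 = 0 := Nat.div_eq_of_lt hm
  unfold Nat.toDigits
  simp [Nat.toDigitsCore, h, Nat.mod_eq_of_lt hm]

lemma horner_toDigits (base : Int) (m : Nat) :
    (Nat.toDigits 10 m).foldl (fun ret c => ret * base + ((c.toNat : Int) - 48)) 0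
      = pvVal base m := by
  induction m using Nat.strong_induction_on with
  | _ m ih =>
    by_cases hm : m < 10
    · rw [toDigits_small m hm]
      simp only [List.foldl, zero_mul, zero_add]
      rw [digitChar_val m hm, pvVal]
      by_cases h0 : m = 0
      · simp [h0]
      · rw [dif_neg h0, Nat.mod_eq_of_lt hm, Nat.div_eq_of_lt hm, pvVal]
        simp
    · rw [toDigits_step m (by omega), List.foldl_append,
          ih (m / 10) (Nat.div_lt_self (by omega) (by omega))]
      simp only [List.foldl]
      rw [digitChar_val (m % 10) (Nat.mod_lt m (by omega))]
      conv_rhs => rw [pvVal, dif_neg (show ¬ m = 0 by omega)]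
      ring

-- ===== VERDICT (by name: the statement is the Claim_ definition above) =====
theorem to_10base_spec : Claim_equal_to_10base := by
  intro n base _hdom hpre
  unfold Spec_to_10base to_10base to_10base_alt
  have hn : (0 : Int) ≤ n := hpre
  have hA := to10Loop_eq base (n.natAbs + 1) n 0 0 hn (by omega)
  rw [hA]
  rw [show PySem.Int.toChars n = Nat.toDigits 10 n.toNat by
    unfold PySem.Int.toChars
    rw [if_neg (by omega)]]
  rw [horner_toDigits base n.toNat]
  ring
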